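-- pv_equiv track=rewrite | github.com/ECamposSoria/quantitative-pricing-tokenized-project-finance | pftoken/amm/core/pool_v3.py | _get_next_initialized_tick
-- ===== SOURCE A (Python) =====
-- from typing import Dict, Iterable, List, Literal, Optional
--
-- def _get_next_initialized_tick(
--     tick: int, zero_for_one: bool, liquidity_net: Dict[int, float]
-- ) -> Optional[int]:
--     if not liquidity_net:
--         return None
--     ticks = sorted(liquidity_net.keys())
--     if zero_for_one:
--         below = [t for t in ticks if t <= tick]
--         if not below:
--             return None
--         return below[-1] if below[-1] < tick else (below[-2] if len(below) > 1 else None)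
--     above = [t for t in ticks if t > tick]
--     if not above:
--         return None
--     return above[0]
-- ===== SOURCE B (Python) =====
-- from typing import Dict, Optional
--
-- def _get_next_initialized_tick(
--     tick: int, zero_for_one: bool, liquidity_net: Dict[int, float]
-- ) -> Optional[int]:
--     best = None
--     if zero_for_one:
--         for t in liquidity_net:
--             if t < tick and (best is None or t > best):
--                 best = t
--     else:
--         for t in liquidity_net:
--             if t > tick and (best is None or t < best):
--                 best = t
--     return best
-- ===== Notes on version B (the rewrite author's own statement) =====
-- stated objective: faster
-- what changed: Replaces sort-then-filter-then-index (A's 'nearest initialized tick strictly below/above' is exactly the max key < tick resp. min key > tick) with one linear pass over the dict keys tracking that extremum.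
import Mathlib
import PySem

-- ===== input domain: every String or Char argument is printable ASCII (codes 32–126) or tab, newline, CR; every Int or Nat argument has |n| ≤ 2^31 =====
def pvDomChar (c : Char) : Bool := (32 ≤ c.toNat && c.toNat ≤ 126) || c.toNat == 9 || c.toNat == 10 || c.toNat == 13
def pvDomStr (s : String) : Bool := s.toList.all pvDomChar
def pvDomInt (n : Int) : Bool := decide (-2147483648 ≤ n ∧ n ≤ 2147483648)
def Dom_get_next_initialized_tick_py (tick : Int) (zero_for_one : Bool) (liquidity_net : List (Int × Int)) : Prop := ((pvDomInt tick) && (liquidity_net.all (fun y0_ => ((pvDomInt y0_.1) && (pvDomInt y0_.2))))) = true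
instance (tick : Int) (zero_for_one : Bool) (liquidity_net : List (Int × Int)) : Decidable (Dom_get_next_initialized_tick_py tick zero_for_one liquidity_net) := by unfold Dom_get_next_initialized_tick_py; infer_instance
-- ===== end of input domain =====

-- B replaces A's sort-then-filter-then-index with one linear pass tracking the max key < tick
-- (resp. min key > tick); same return value, O(n) instead of O(n log n).

-- ===== PORT A =====
-- liquidity_net is a dict: sorted(liquidity_net.keys()) = sorted over the distinct keys
-- (first occurrences), rendered as PySem.List.sorted of PySem.List.dedup of the key list.
def get_next_initialized_tick_py (tick : Int) (zero_for_one : Bool) (liquidity_net : List (Int × Int)) : Option Int :=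
  if liquidity_net = [] then none
  else
    let ticks := PySem.List.sorted (PySem.List.dedup (liquidity_net.map Prod.fst)) (fun x => x) false
    if zero_for_one then
      let below := ticks.filter (fun u => decide (u ≤ tick))
      if below = [] then none
      else
        match PySem.List.pyGet? below (-1) with
        | none => none     -- unreachable: below ≠ []
        | some last =>
          if last < tick then some last
          else if 1 < below.length then PySem.List.pyGet? below (-2) else none
    else
      let above := ticks.filter (fun u => decide (tick < u))
      if above = [] then none
      else PySem.List.pyGet? above 0

-- ===== PORT B =====
def get_next_initialized_tick_py_alt (tick : Int) (zero_for_one : Bool) (liquidity_net : List (Int × Int)) : Option Int :=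
  if zero_for_one then
    liquidity_net.foldl (fun best p =>
      if p.1 < tick then
        match best with
        | none => some p.1
        | some b => if b < p.1 then some p.1 else best
      else best) none
  else
    liquidity_net.foldl (fun best p =>
      if tick < p.1 then
        match best with
        | none => some p.1
        | some b => if p.1 < b then some p.1 else best
      else best) none

-- ===== PRECONDITION & SPEC =====
def Spec_get_next_initialized_tick_py (tick : Int) (zero_for_one : Bool) (liquidity_net : List (Int × Int)) (out : Option Int) : Prop := out = get_next_initialized_tick_py_alt tick zero_for_one liquidity_net
instance (tick : Int) (zero_for_one : Bool) (liquidity_net : List (Int × Int)) (out : Option Int) : Decidable (Spec_get_next_initialized_tick_py tick zero_for_one liquidity_net out) := by unfold Spec_get_next_initialized_tick_py; infer_instance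

-- ===== CLAIM (what is proved, stated in full; the proofs are below) =====
def Claim_equal_get_next_initialized_tick_py : Prop := ∀ (tick : Int) (zero_for_one : Bool) (liquidity_net : List (Int × Int)), Dom_get_next_initialized_tick_py tick zero_for_one liquidity_net → Spec_get_next_initialized_tick_py tick zero_for_one liquidity_net (get_next_initialized_tick_py tick zero_for_one liquidity_net)

-- ===== LEMMAS AND PROOFS =====

-- B's zero_for_one loop computes the maximum of the keys below tick.
theorem pvFoldMax (t : Int) (l : List (Int × Int)) : ∀ acc : Option Int,
    l.foldl (fun best p =>
      if p.1 < t then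
        match best with
        | none => some p.1
        | some b => if b < p.1 then some p.1 else best
      else best) acc
    = (match acc with
       | none => ((l.map Prod.fst).filter (fun k => decide (k < t))).max?
       | some b => some (((l.map Prod.fst).filter (fun k => decide (k < t))).foldl max b)) := by
  induction l with
  | nil => intro acc; cases acc <;> rfl
  | cons p tl ih =>
    intro acc
    by_cases hk : p.1 < t
    · cases acc with
      | none =>
        simp only [List.foldl_cons, List.map_cons, List.filter_cons, if_pos hk, decide_eq_true hk,
          if_true]
        rw [ih (some p.1)]
        rfl
      | some b =>
        have hmax : (if b < p.1 then some p.1 else some b) = some (max b p.1) := by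
          split_ifs with h
          · simp [max_eq_right (le_of_lt h)]
          · simp [max_eq_left (le_of_not_gt h)]
        simp only [List.foldl_cons, List.map_cons, List.filter_cons, if_pos hk, decide_eq_true hk,
          if_true, hmax]
        rw [ih (some (max b p.1))]
    · have hd : (decide (p.1 < t)) = false := decide_eq_false hk
      simp only [List.foldl_cons, List.map_cons, List.filter_cons, hd, if_neg hk,
        Bool.false_eq_true, if_false]
      exact ih acc

-- B's other loop computes the minimum of the keys above tick.
theorem pvFoldMin (t : Int) (l : List (Int × Int)) : ∀ acc : Option Int,
    l.foldl (fun best p =>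
      if t < p.1 then
        match best with
        | none => some p.1
        | some b => if p.1 < b then some p.1 else best
      else best) acc
    = (match acc with
       | none => ((l.map Prod.fst).filter (fun k => decide (t < k))).min?
       | some b => some (((l.map Prod.fst).filter (fun k => decide (t < k))).foldl min b)) := by
  induction l with
  | nil => intro acc; cases acc <;> rfl
  | cons p tl ih =>
    intro acc
    by_cases hk : t < p.1
    · cases acc with
      | none =>
        simp only [List.foldl_cons, List.map_cons, List.filter_cons, if_pos hk, decide_eq_true hk,
          if_true]
        rw [ih (some p.1)]
        rfl
      | some b =>
        have hmin : (if p.1 < b then some p.1 else some b) = some (min b p.1) := by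
          split_ifs with h
          · simp [min_eq_right (le_of_lt h)]
          · simp [min_eq_left (le_of_not_gt h)]
        simp only [List.foldl_cons, List.map_cons, List.filter_cons, if_pos hk, decide_eq_true hk,
          if_true, hmin]
        rw [ih (some (min b p.1))]
    · have hd : (decide (t < p.1)) = false := decide_eq_false hk
      simp only [List.foldl_cons, List.map_cons, List.filter_cons, hd, if_neg hk,
        Bool.false_eq_true, if_false]
      exact ih acc



theorem pvPyGetNegOne (xs : List Int) : PySem.List.pyGet? xs (-1) = xs.getLast? := by
  cases xs with
  | nil => rfl
  | cons x t => simp [PySem.List.pyGet?, PySem.List.pyIdx?, List.getLast?_eq_getElem?]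

theorem pvPyGetNegTwo (xs : List Int) (h : 2 ≤ xs.length) :
    PySem.List.pyGet? xs (-2) = xs[xs.length - 2]? := by
  have h1 : ¬ (0:Int) ≤ -2 := by norm_num
  have h2 : -(xs.length:Int) ≤ -2 := by omega
  simp only [PySem.List.pyGet?, PySem.List.pyIdx?, if_neg h1, if_pos h2]
  rfl

theorem pvMaxCongrMem (l1 l2 : List Int) (h : ∀ x, x ∈ l1 ↔ x ∈ l2) : l1.max? = l2.max? := by
  cases hm : l1.max? with
  | none =>
    rw [List.max?_eq_none_iff] at hm
    subst hm
    symm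
    rw [List.max?_eq_none_iff, List.eq_nil_iff_forall_not_mem]
    intro x hx
    simpa using (h x).mpr hx
  | some m =>
    rw [List.max?_eq_some_iff] at hm
    symm
    rw [List.max?_eq_some_iff]
    exact ⟨(h m).mp hm.1, fun b hb => hm.2 b ((h b).mpr hb)⟩

theorem pvMaxSorted (zs : List Int) (h : zs.Pairwise (· < ·)) : zs.max? = zs.getLast? := by
  by_cases hz : zs = []
  · rw [hz]; rfl
  · obtain ⟨ws, b, hwb⟩ : ∃ ws b, zs = ws ++ [b] :=
      ⟨zs.dropLast, zs.getLast hz, (List.dropLast_concat_getLast hz).symm⟩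
    subst hwb
    rw [List.getLast?_concat, List.max?_eq_some_iff]
    rw [List.pairwise_append] at h
    refine ⟨by simp, fun x hx => ?_⟩
    rcases List.mem_append.mp hx with hx | hx
    · exact le_of_lt (h.2.2 x hx b (List.mem_singleton_self b))
    · rw [List.mem_singleton.mp hx]

theorem pvBelowBranch (t : Int) (ys : List Int) (hp : ys.Pairwise (· < ·)) :
    (if ys.filter (fun u => decide (u ≤ t)) = [] then none
     else
       match PySem.List.pyGet? (ys.filter (fun u => decide (u ≤ t))) (-1) with
       | none => none
       | some last =>
         if last < t then some last
         else if 1 < (ys.filter (fun u => decide (u ≤ t))).length then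
           PySem.List.pyGet? (ys.filter (fun u => decide (u ≤ t))) (-2)
         else none)
    = (ys.filter (fun u => decide (u < t))).max? := by
  set below := ys.filter (fun u => decide (u ≤ t)) with hbdef
  have hbp : below.Pairwise (· < ·) := hp.sublist List.filter_sublist
  have hmem_below : ∀ x, x ∈ below ↔ x ∈ ys ∧ x ≤ t := by
    intro x; rw [hbdef, List.mem_filter]; simp
  have hmem_lt : ∀ x, x ∈ ys.filter (fun u => decide (u < t)) ↔ x ∈ ys ∧ x < t := by
    intro x; rw [List.mem_filter]; simp
  by_cases hb : below = []
  · rw [if_pos hb]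
    symm
    rw [List.max?_eq_none_iff, List.eq_nil_iff_forall_not_mem]
    intro x hx
    rcases (hmem_lt x).mp hx with ⟨hxy, hxt⟩
    have : x ∈ below := (hmem_below x).mpr ⟨hxy, le_of_lt hxt⟩
    rw [hb] at this
    simp at this
  · rw [if_neg hb]
    obtain ⟨zs, a, hza⟩ : ∃ zs a, below = zs ++ [a] :=
      ⟨below.dropLast, below.getLast hb, (List.dropLast_concat_getLast hb).symm⟩
    have hlast : PySem.List.pyGet? below (-1) = some a := by
      rw [pvPyGetNegOne, hza, List.getLast?_concat]
    rw [hlast]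
    dsimp only
    have hpz : (zs ++ [a]).Pairwise (· < ·) := hza ▸ hbp
    rw [List.pairwise_append] at hpz
    have hxa : ∀ x ∈ zs, x < a := fun x hx => hpz.2.2 x hx a (List.mem_singleton_self a)
    have hamem : a ∈ below := by rw [hza]; simp
    have ha_le : a ≤ t := ((hmem_below a).mp hamem).2
    by_cases hat : a < t
    · rw [if_pos hat]
      symm
      rw [List.max?_eq_some_iff]
      refine ⟨(hmem_lt a).mpr ⟨((hmem_below a).mp hamem).1, hat⟩, fun b hbm => ?_⟩
      rcases (hmem_lt b).mp hbm with ⟨hby, hbt⟩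
      have hbb : b ∈ below := (hmem_below b).mpr ⟨hby, le_of_lt hbt⟩
      rw [hza] at hbb
      rcases List.mem_append.mp hbb with hbz | hbz
      · exact le_of_lt (hxa b hbz)
      · rw [List.mem_singleton.mp hbz]
    · rw [if_neg hat]
      have hat' : a = t := le_antisymm ha_le (not_lt.mp hat)
      have hmemz : ∀ x, x ∈ ys.filter (fun u => decide (u < t)) ↔ x ∈ zs := by
        intro x
        rw [hmem_lt x]
        constructor
        · rintro ⟨hxy, hxt⟩
          have hxb : x ∈ below := (hmem_below x).mpr ⟨hxy, le_of_lt hxt⟩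
          rw [hza] at hxb
          rcases List.mem_append.mp hxb with hxz | hxz
          · exact hxz
          · exact absurd (List.mem_singleton.mp hxz ▸ hxt) (by rw [List.mem_singleton.mp hxz, hat'] at hxt; omega)
        · intro hxz
          have hxb : x ∈ below := by rw [hza]; exact List.mem_append.mpr (Or.inl hxz)
          exact ⟨((hmem_below x).mp hxb).1, hat' ▸ hxa x hxz⟩
      rw [pvMaxCongrMem _ zs hmemz]
      by_cases hz : 1 < below.length
      · rw [if_pos hz]
        have h2 : 2 ≤ below.length := hz
        rw [pvPyGetNegTwo below h2]
        have hzl : zs.length = below.length - 1 := by rw [hza]; simp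
        have hzs : zs ≠ [] := by
          intro h0
          rw [hza, h0] at hz
          simp at hz
        have hlpos : 1 ≤ zs.length := List.length_pos_of_ne_nil hzs
        have hidx : below[below.length - 2]? = zs[zs.length - 1]? := by
          conv_lhs => rw [hza]
          rw [List.getElem?_append_left (by simp; omega)]
          congr 1
          simp
        rw [hidx, ← List.getLast?_eq_getElem?]
        exact ((pvMaxSorted zs hpz.1).trans rfl).symm
      · rw [if_neg hz]
        have hzs : zs = [] := by
          rcases List.eq_nil_or_concat zs with h0 | ⟨ws, w, h0⟩
          · exact h0
          · exfalso; apply hz; rw [hza, h0]; simp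
        rw [hzs]
        rfl

theorem pvMinCongrMem (l1 l2 : List Int) (h : ∀ x, x ∈ l1 ↔ x ∈ l2) : l1.min? = l2.min? := by
  cases hm : l1.min? with
  | none =>
    rw [List.min?_eq_none_iff] at hm
    subst hm
    symm
    rw [List.min?_eq_none_iff, List.eq_nil_iff_forall_not_mem]
    intro x hx
    have := (h x).mpr hx
    simp at this
  | some m =>
    rw [List.min?_eq_some_iff] at hm
    symm
    rw [List.min?_eq_some_iff]
    exact ⟨(h m).mp hm.1, fun b hb => hm.2 b ((h b).mpr hb)⟩

-- A's other branch: the head of the (sorted) keys above tick is their minimum.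
theorem pvHeadSorted (zs : List Int) (h : zs.Pairwise (· < ·)) :
    (if zs = [] then none else PySem.List.pyGet? zs 0) = zs.min? := by
  cases zs with
  | nil => rfl
  | cons c rest =>
    rw [if_neg (by simp), List.pairwise_cons] at *
    have : PySem.List.pyGet? (c :: rest) 0 = some c := by
      simp [PySem.List.pyGet?, PySem.List.pyIdx?]
    rw [this]
    symm
    rw [List.min?_eq_some_iff]
    exact ⟨List.mem_cons_self, fun b hb => by
      rcases List.mem_cons.mp hb with hb | hb
      · rw [hb]
      · exact le_of_lt (h.1 b hb)⟩

-- ===== VERDICT (by name: the statement is the Claim_ definition above) =====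
theorem get_next_initialized_tick_py_spec : Claim_equal_get_next_initialized_tick_py := by
  intro tick zfo ln _hdom
  unfold Spec_get_next_initialized_tick_py get_next_initialized_tick_py get_next_initialized_tick_py_alt
  have hp : (PySem.List.sorted (PySem.List.dedup (ln.map Prod.fst)) (fun x => x) false).Pairwise (· < ·) := by
    rw [PySem.List.dedup_eq_ofList]
    exact PySem.List.sorted_ofList_pairwise_lt (ln.map Prod.fst)
  have hmem : ∀ x : Int, x ∈ PySem.List.sorted (PySem.List.dedup (ln.map Prod.fst)) (fun x => x) false ↔ x ∈ ln.map Prod.fst := by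
    intro x
    rw [PySem.List.mem_sorted, PySem.List.mem_dedup]
  by_cases hln : ln = []
  · subst hln
    cases zfo <;> rfl
  · rw [if_neg hln]
    cases zfo with
    | true =>
      simp only [if_true]
      rw [pvFoldMax, pvBelowBranch tick _ hp]
      exact pvMaxCongrMem _ _ (fun x => by
        simp only [List.mem_filter]
        exact and_congr_left' (hmem x))
    | false =>
      simp only [Bool.false_eq_true, if_false]
      rw [pvFoldMin, pvHeadSorted _ (hp.sublist List.filter_sublist)]
      exact pvMinCongrMem _ _ (fun x => by
        simp only [List.mem_filter]
        exact and_congr_left' (hmem x))
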